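-- pv_equiv track=rewrite | github.com/dankNecessities/hashCode-Qualification | pizza_soln.py | has_zero
-- ===== SOURCE A (Python) =====
-- def has_zero(array):
-- 	"""
-- 	Returns True if a 0 is found within the array
-- 	Returns the location of the last zero found
-- 	"""
-- 	ans = False
-- 	z_x, z_y = 0, 0
-- 	zero_coord = None
-- 	for i in array:
-- 		for j in i:
-- 			if j == 0:
-- 				zero_coord = (z_x, z_y)
-- 				ans = True
-- 			z_y += 1
-- 		z_y = 0
-- 		z_x += 1
-- 	return ans, zero_coord
-- ===== SOURCE B (Python) =====
-- def has_zero(array):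
--     # Reverse traversal with early exit: the first zero found scanning
--     # from the last row/last column backwards is the last zero in forward order.
--     for i in range(len(array) - 1, -1, -1):
--         row = array[i]
--         for j in range(len(row) - 1, -1, -1):
--             if row[j] == 0:
--                 return True, (i, j)
--     return False, None
-- ===== Notes on version B (the rewrite author's own statement) =====
-- stated objective: faster
-- what changed: Replaces A's exhaustive forward double loop that keeps overwriting the last-seen zero with a reverse traversal (last row to first, last column to first) that returns at the first zero found.
import Mathlib
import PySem

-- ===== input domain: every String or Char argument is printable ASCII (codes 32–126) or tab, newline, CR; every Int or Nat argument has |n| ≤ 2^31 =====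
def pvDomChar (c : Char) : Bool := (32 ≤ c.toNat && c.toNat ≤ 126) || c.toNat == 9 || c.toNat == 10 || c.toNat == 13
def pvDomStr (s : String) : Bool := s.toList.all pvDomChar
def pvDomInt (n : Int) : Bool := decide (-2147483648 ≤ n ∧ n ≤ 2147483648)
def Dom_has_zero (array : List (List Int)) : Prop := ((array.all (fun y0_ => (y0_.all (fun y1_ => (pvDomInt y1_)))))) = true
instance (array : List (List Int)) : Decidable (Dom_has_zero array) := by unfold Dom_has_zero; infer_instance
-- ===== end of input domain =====

-- B replaces A's exhaustive forward double loop (overwriting the last-seen zero)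
-- with a reverse traversal that returns at the first zero found; same return value.

-- ===== PORT A =====
-- A's forward double loop: state (ans, zero_coord, z_x) outside, (ans, zero_coord, z_y) inside.
def has_zero (array : List (List Int)) : Bool × (Option (Int × Int)) :=
  let st := array.foldl
    (fun (st : Bool × Option (Int × Int) × Int) row =>
      let inner := row.foldl
        (fun (s : Bool × Option (Int × Int) × Int) j =>
          if j = 0 then (true, some (st.2.2, s.2.2), s.2.2 + 1)
          else (s.1, s.2.1, s.2.2 + 1))
        (st.1, st.2.1, (0 : Int))
      (inner.1, inner.2.1, st.2.2 + 1))
    (false, none, (0 : Int))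
  (st.1, st.2.1)

-- ===== PORT B =====
-- B's inner reverse scan of one row: indices from the back, first zero found.
def lastZeroInRow : List Int → Option Nat
  | [] => none
  | x :: xs =>
    match lastZeroInRow xs with
    | some j => some (j + 1)
    | none => if x = 0 then some 0 else none

-- B's outer reverse scan: later rows are examined first; early exit on a hit.
def lastZeroPos : List (List Int) → Option (Nat × Nat)
  | [] => none
  | row :: rest =>
    match lastZeroPos rest with
    | some (i, j) => some (i + 1, j)
    | none =>
      match lastZeroInRow row with
      | some j => some (0, j)
      | none => none

def has_zero_alt (array : List (List Int)) : Bool × (Option (Int × Int)) :=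
  match lastZeroPos array with
  | some (i, j) => (true, some ((i : Int), (j : Int)))
  | none => (false, none)

-- ===== PRECONDITION & SPEC =====
def Spec_has_zero (array : List (List Int)) (out : Bool × (Option (Int × Int))) : Prop := out = has_zero_alt array
instance (array : List (List Int)) (out : Bool × (Option (Int × Int))) : Decidable (Spec_has_zero array out) := by unfold Spec_has_zero; infer_instance

-- ===== CLAIM (what is proved, stated in full; the proofs are below) =====
def Claim_equal_has_zero : Prop := ∀ (array : List (List Int)), Dom_has_zero array → Spec_has_zero array (has_zero array)

-- ===== LEMMAS AND PROOFS =====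
theorem inner_eq (zx : Int) (row : List Int) (a : Bool) (c : Option (Int × Int)) (zy : Int) :
    row.foldl
      (fun (s : Bool × Option (Int × Int) × Int) j =>
        if j = 0 then (true, some (zx, s.2.2), s.2.2 + 1)
        else (s.1, s.2.1, s.2.2 + 1))
      (a, c, zy)
    = (match lastZeroInRow row with
       | some j => (true, some (zx, zy + (j : Int)), zy + row.length)
       | none => (a, c, zy + row.length)) := by
  induction row generalizing a c zy with
  | nil => simp [lastZeroInRow]
  | cons x xs ih =>
    simp only [List.foldl_cons]
    by_cases hx : x = 0
    · simp only [hx, if_pos]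
      rw [ih]
      cases h : lastZeroInRow xs with
      | none =>
        simp only [lastZeroInRow, h, if_pos]
        simp
        omega
      | some j =>
        simp only [lastZeroInRow, h]
        simp
        omega
    · simp only [if_neg hx]
      rw [ih]
      cases h : lastZeroInRow xs with
      | none =>
        simp only [lastZeroInRow, h, if_neg hx]
        simp
        omega
      | some j =>
        simp only [lastZeroInRow, h]
        simp
        omega

theorem outer_eq (array : List (List Int)) (a : Bool) (c : Option (Int × Int)) (zx : Int) :
    array.foldl
      (fun (st : Bool × Option (Int × Int) × Int) row =>
        let inner := row.foldl
          (fun (s : Bool × Option (Int × Int) × Int) j =>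
            if j = 0 then (true, some (st.2.2, s.2.2), s.2.2 + 1)
            else (s.1, s.2.1, s.2.2 + 1))
          (st.1, st.2.1, (0 : Int))
        (inner.1, inner.2.1, st.2.2 + 1))
      (a, c, zx)
    = (match lastZeroPos array with
       | some (i, j) => (true, some (zx + (i : Int), (j : Int)), zx + array.length)
       | none => (a, c, zx + array.length)) := by
  induction array generalizing a c zx with
  | nil => simp [lastZeroPos]
  | cons row rest ih =>
    simp only [List.foldl_cons]
    rw [inner_eq]
    cases hr : lastZeroInRow row with
    | none =>
      simp only
      rw [ih]
      cases h : lastZeroPos rest with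
      | none =>
        simp only [lastZeroPos, h, hr]
        simp
        omega
      | some p =>
        obtain ⟨i, j⟩ := p
        simp only [lastZeroPos, h]
        simp
        omega
    | some j0 =>
      simp only
      rw [ih]
      cases h : lastZeroPos rest with
      | none =>
        simp only [lastZeroPos, h, hr]
        simp
        omega
      | some p =>
        obtain ⟨i, j⟩ := p
        simp only [lastZeroPos, h]
        simp
        omega

-- ===== VERDICT (by name: the statement is the Claim_ definition above) =====
theorem has_zero_spec : Claim_equal_has_zero := by
  intro array _
  unfold Spec_has_zero has_zero has_zero_alt
  rw [outer_eq]
  cases h : lastZeroPos array with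
  | none => simp
  | some p => obtain ⟨i, j⟩ := p; simp
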